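-- pv_equiv track=rewrite | github.com/globalise-huygens/GloBERTise-eval | evaluation_in_batches.py | find_event_groups
-- ===== SOURCE A (Python) =====
-- def find_event_groups(series):
--     """
--     This function is used by the code calculating event mention span detection accuracy
--     Looks for subsequent tokens labeled with I-event in a list of gold or predicted labels and stores indexes of groups in list of list
--     ChatGPT was used for the creation of this function
--
--     :param series: list
--     """
--     groups = []
--     group = []
--     for i, label in enumerate(series):
--         if label == 'I-event':
--             group.append(i)
--         else:
--             if group:
--                 groups.append(group)
--                 group = []
--     if group:  # Append the last group if it's an 'I' group
--         groups.append(group)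
--     return groups
-- ===== SOURCE B (Python) =====
-- def find_event_groups(series):
--     # Two-pass: first collect all 'I-event' indices, then segment that index
--     # list into maximal runs of consecutive integers.
--     idxs = [i for i, label in enumerate(series) if label == 'I-event']
--     groups = []
--     for i in idxs:
--         if groups and groups[-1][-1] == i - 1:
--             groups[-1].append(i)
--         else:
--             groups.append([i])
--     return groups
-- ===== Notes on version B (the rewrite author's own statement) =====
-- stated objective: alternative
-- what changed: Replaces the flush-on-mismatch accumulator (open group flushed when a non-matching label is seen) with a two-pass filter-then-segment: first collect all 'I-event' indices, then split that index list into runs wherever the gap exceeds 1.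
import Mathlib
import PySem

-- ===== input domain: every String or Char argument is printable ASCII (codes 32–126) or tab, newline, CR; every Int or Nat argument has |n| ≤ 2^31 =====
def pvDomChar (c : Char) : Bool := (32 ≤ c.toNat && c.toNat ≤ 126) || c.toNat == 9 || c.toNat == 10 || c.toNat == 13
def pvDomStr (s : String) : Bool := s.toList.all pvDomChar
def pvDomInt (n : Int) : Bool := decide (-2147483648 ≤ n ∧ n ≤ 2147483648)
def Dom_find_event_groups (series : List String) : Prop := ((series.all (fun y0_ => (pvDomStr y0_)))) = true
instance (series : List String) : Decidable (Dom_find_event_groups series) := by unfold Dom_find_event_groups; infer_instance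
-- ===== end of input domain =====

-- B replaces A's flush-on-mismatch accumulator with a two-pass filter-then-segment
-- decomposition (alternative, same O(n) cost in Python).

-- ===== PORT A =====
-- the for-loop over enumerate(series), state (groups, group); the trailing
-- 'if group: groups.append(group)' is the base case
def pvALoop : List String → Int → List (List Int) → List Int → List (List Int)
  | [], _, groups, group => if group = [] then groups else groups ++ [group]
  | label :: rest, i, groups, group =>
    if label = "I-event" then
      pvALoop rest (i + 1) groups (group ++ [i])
    else
      if group = [] then pvALoop rest (i + 1) groups group
      else pvALoop rest (i + 1) (groups ++ [group]) []

def find_event_groups (series : List String) : List (List Int) :=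
  pvALoop series 0 [] []

-- ===== PORT B =====
-- pass 1: the comprehension [i for i, label in enumerate(series) if label == 'I-event']
def pvBIdxs : List String → Int → List Int
  | [], _ => []
  | label :: rest, i =>
    if label = "I-event" then i :: pvBIdxs rest (i + 1) else pvBIdxs rest (i + 1)

-- pass 2 body: 'if groups and groups[-1][-1] == i - 1' (groups[-1][-1] via getLast?)
def pvBStep (groups : List (List Int)) (i : Int) : List (List Int) :=
  match groups.getLast? with
  | some g => if g.getLast? = some (i - 1) then groups.dropLast ++ [g ++ [i]]
              else groups ++ [[i]]
  | none => groups ++ [[i]]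

def pvBLoop : List Int → List (List Int) → List (List Int)
  | [], groups => groups
  | i :: rest, groups => pvBLoop rest (pvBStep groups i)

def find_event_groups_alt (series : List String) : List (List Int) :=
  pvBLoop (pvBIdxs series 0) []

-- ===== PRECONDITION & SPEC =====
def Spec_find_event_groups (series : List String) (out : List (List Int)) : Prop := out = find_event_groups_alt series
instance (series : List String) (out : List (List Int)) : Decidable (Spec_find_event_groups series out) := by unfold Spec_find_event_groups; infer_instance

-- ===== CLAIM (what is proved, stated in full; the proofs are below) =====
def Claim_equal_find_event_groups : Prop := ∀ (series : List String), Dom_find_event_groups series → Spec_find_event_groups series (find_event_groups series)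

-- ===== LEMMAS AND PROOFS =====

-- Invariant tying A's loop state to B's: either the open group is empty and every
-- index already committed ends strictly below i-1, or the open group ends at i-1.
lemma pv_key : ∀ (xs : List String) (i : Int) (groups : List (List Int)) (group : List Int),
    ((group = [] ∧ ∀ x, (groups.getLast?.bind List.getLast?) = some x → x < i - 1)
      ∨ group.getLast? = some (i - 1)) →
    pvALoop xs i groups group
      = pvBLoop (pvBIdxs xs i) (if group = [] then groups else groups ++ [group]) := by
  intro xs
  induction xs with
  | nil =>
    intro i groups group _
    simp [pvALoop, pvBIdxs, pvBLoop]
  | cons label rest ih =>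
    intro i groups group hinv
    by_cases hl : label = "I-event"
    · by_cases hg : group = []
      · subst hg
        have hb : pvBStep groups i = groups ++ [[i]] := by
          rcases hinv with ⟨_, h⟩ | h
          · unfold pvBStep
            cases hgl : groups.getLast? with
            | none => simp
            | some g =>
              cases hgg : g.getLast? with
              | none => simp [hgg]
              | some x =>
                have : x < i - 1 := h x (by simp [hgl, hgg])
                have : ¬ (some x = some (i - 1)) := by
                  intro hc; injection hc with hc; omega
                simp [hgg, this]
          · simp at h
        rw [pvALoop, if_pos hl, pvBIdxs, if_pos hl, pvBLoop, if_pos rfl, hb]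
        have := ih (i + 1) groups ([] ++ [i]) (Or.inr (by simp))
        simpa using this
      · have hinv' : group.getLast? = some (i - 1) := by
          rcases hinv with ⟨h, _⟩ | h
          · exact absurd h hg
          · exact h
        rw [pvALoop, if_pos hl, pvBIdxs, if_pos hl, if_neg hg, pvBLoop]
        have hb : pvBStep (groups ++ [group]) i = groups ++ [group ++ [i]] := by
          unfold pvBStep
          simp [hinv']
        rw [hb]
        have hne : group ++ [i] ≠ [] := by simp
        have := ih (i + 1) groups (group ++ [i])
          (Or.inr (by simp))
        rw [this]
        simp [hne]
    · by_cases hg : group = []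
      · subst hg
        rw [pvALoop, if_neg hl, if_pos rfl, pvBIdxs, if_neg hl]
        have hinv' : ∀ x, (groups.getLast?.bind List.getLast?) = some x → x < i - 1 := by
          rcases hinv with ⟨_, h⟩ | h
          · exact h
          · simp at h
        have := ih (i + 1) groups [] (Or.inl ⟨rfl, fun x hx => by
          have := hinv' x hx; omega⟩)
        simpa using this
      · have hinv' : group.getLast? = some (i - 1) := by
          rcases hinv with ⟨h, _⟩ | h
          · exact absurd h hg
          · exact h
        rw [pvALoop, if_neg hl, if_neg hg, pvBIdxs, if_neg hl]
        have := ih (i + 1) (groups ++ [group]) [] (Or.inl ⟨rfl, fun x hx => by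
          simp [hinv'] at hx
          omega⟩)
        rw [this]
        simp [hg]

-- ===== VERDICT (by name: the statement is the Claim_ definition above) =====
theorem find_event_groups_spec : Claim_equal_find_event_groups := by
  intro series _
  unfold Spec_find_event_groups find_event_groups find_event_groups_alt
  have := pv_key series 0 [] [] (Or.inl ⟨rfl, by simp⟩)
  simpa using this
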